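-- pv_equiv track=rewrite | github.com/YevhenBrusak/Crypto | Lab11/Part2.py | find_points_on_curve
-- ===== SOURCE A (Python) =====
-- def find_points_on_curve(modulus=23):
--     """
--     Finds all points (x, y) that satisfy the elliptic curve equation:
--     y^2 = (x^3 + x + 1) mod modulus
--
--     Parameters:
--         modulus (int): The modulus to use in the equation.
--
--     Returns:
--         list: A list of tuples representing the points (x, y) on the curve.
--     """
--     points = []  # List to store the valid points
--
--     # Iterate over all possible values of x in the range [0, modulus - 1]
--     for x in range(modulus):
--         # Compute the right-hand side of the equation: (x^3 + x + 1) % modulus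
--         rhs = (x**3 + x + 1) % modulus
--
--         # Iterate over all possible values of y in the range [0, modulus - 1]
--         for y in range(modulus):
--             # Compute the left-hand side of the equation: y^2 % modulus
--             lhs = (y**2) % modulus
--
--             # Check if lhs equals rhs (y^2 == x^3 + x + 1 mod modulus)
--             if lhs == rhs:
--                 points.append((x, y))  # Add the valid point (x, y) to the list
--
--     return points
-- ===== SOURCE B (Python) =====
-- def find_points_on_curve(modulus=23):
--     """Same result as A: precompute residue -> list of y once, then one lookup per x."""
--     ys_by_residue = {}
--     for y in range(modulus):
--         r = (y * y) % modulus
--         ys_by_residue[r] = ys_by_residue.get(r, []) + [y]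
--     points = []
--     for x in range(modulus):
--         rhs = (x ** 3 + x + 1) % modulus
--         for y in ys_by_residue.get(rhs, []):
--             points.append((x, y))
--     return points
-- ===== Notes on version B (the rewrite author's own statement) =====
-- stated objective: faster
-- what changed: Replaces the nested scan over all (x,y) pairs by a dictionary residue -> sorted list of y built in one pass over y, then a single lookup per x, removing the inner loop.
import Mathlib
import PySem

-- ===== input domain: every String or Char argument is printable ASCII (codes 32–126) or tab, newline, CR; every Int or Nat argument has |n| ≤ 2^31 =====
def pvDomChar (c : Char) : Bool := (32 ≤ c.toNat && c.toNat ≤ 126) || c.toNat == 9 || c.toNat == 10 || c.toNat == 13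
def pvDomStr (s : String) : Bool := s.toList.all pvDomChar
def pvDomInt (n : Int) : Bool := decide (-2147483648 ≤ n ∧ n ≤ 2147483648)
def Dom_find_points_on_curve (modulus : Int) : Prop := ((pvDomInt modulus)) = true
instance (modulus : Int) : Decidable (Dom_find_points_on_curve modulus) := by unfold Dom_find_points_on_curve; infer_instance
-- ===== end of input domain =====

-- B replaces A's nested scan over all (x,y) pairs by a dict residue -> y-list built in one
-- pass over y, then one lookup per x (asymptotically faster); proved to return A's exact list.


-- ===== PORT A =====
def find_points_on_curve (modulus : Int) : List (Int × Int) :=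
  (PySem.List.pyRange 0 modulus 1).foldl (fun points x =>
    let rhs := PySem.Int.mod (x ^ 3 + x + 1) modulus
    (PySem.List.pyRange 0 modulus 1).foldl (fun points y =>
      let lhs := PySem.Int.mod (y ^ 2) modulus
      if lhs == rhs then points ++ [(x, y)] else points) points) []

-- ===== PORT B =====
-- ys_by_residue: one pass over y; res[r] = res.get(r, []) + [y]
def fpocResidues (modulus : Int) : PySem.Dict Int (List Int) :=
  (PySem.List.pyRange 0 modulus 1).foldl
    (fun d y => d.modify (PySem.Int.mod (y * y) modulus) [] (fun l => l ++ [y]))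
    PySem.Dict.empty

def find_points_on_curve_alt (modulus : Int) : List (Int × Int) :=
  let ys_by_residue := fpocResidues modulus
  (PySem.List.pyRange 0 modulus 1).foldl (fun points x =>
    let rhs := PySem.Int.mod (x ^ 3 + x + 1) modulus
    (ys_by_residue.getD rhs []).foldl (fun points y => points ++ [(x, y)]) points) []

-- ===== PRECONDITION & SPEC =====
def Spec_find_points_on_curve (modulus : Int) (out : List (Int × Int)) : Prop := out = find_points_on_curve_alt modulus
instance (modulus : Int) (out : List (Int × Int)) : Decidable (Spec_find_points_on_curve modulus out) := by unfold Spec_find_points_on_curve; infer_instance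

-- ===== CLAIM (what is proved, stated in full; the proofs are below) =====
def Claim_equal_find_points_on_curve : Prop := ∀ (modulus : Int), Dom_find_points_on_curve modulus → Spec_find_points_on_curve modulus (find_points_on_curve modulus)

-- ===== LEMMAS AND PROOFS =====

-- the dict built by B maps each residue r to exactly the y of the range with y*y % m = r, in order
theorem fpoc_getD_foldl (m : Int) (ys : List Int) (d : PySem.Dict Int (List Int)) (r : Int) :
    (ys.foldl (fun d y => d.modify (PySem.Int.mod (y * y) m) [] (fun l => l ++ [y])) d).getD r []
      = d.getD r [] ++ ys.filter (fun y => PySem.Int.mod (y * y) m == r) := by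
  induction ys generalizing d with
  | nil => simp
  | cons y ys ih =>
    simp only [List.foldl_cons, List.filter_cons, ih, PySem.Dict.getD_modify]
    by_cases h : PySem.Int.mod (y * y) m = r
    · simp [h]
    · simp [h, Ne.symm h]

theorem fpoc_getD (m r : Int) :
    (fpocResidues m).getD r []
      = (PySem.List.pyRange 0 m 1).filter (fun y => PySem.Int.mod (y * y) m == r) := by
  simpa using fpoc_getD_foldl m (PySem.List.pyRange 0 m 1) PySem.Dict.empty r

-- ===== VERDICT (by name: the statement is the Claim_ definition above) =====
theorem find_points_on_curve_spec : Claim_equal_find_points_on_curve := by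
  intro m _
  show find_points_on_curve m = find_points_on_curve_alt m
  unfold find_points_on_curve find_points_on_curve_alt
  apply PySem.List.foldl_congr_mem
  intro points x _
  dsimp only
  rw [fpoc_getD, PySem.List.foldl_append_singleton_eq_map,
      PySem.List.foldl_append_if (fun y => PySem.Int.mod (y ^ 2) m == PySem.Int.mod (x ^ 3 + x + 1) m)
        (fun y => (x, y))]
  have : ∀ y : Int, y ^ 2 = y * y := fun y => sq y
  simp [this]
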